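-- pv_equiv track=rewrite | github.com/tuncb/dfixxer-pre-commit | dfixxer_hook.py | find_download_asset
-- ===== SOURCE A (Python) =====
-- from typing import List, Optional
--
-- DFIXXER_RELEASE_TAG = "v0.9.2"
--
-- def find_download_asset(release_data: dict, platform_name: str, arch: str) -> tuple[Optional[str], Optional[str], bool]:
--     """Find the preferred download URL for a platform (binary first, then zip)."""
--     assets = release_data.get("assets", [])
--     base_name = f"dfixxer-{platform_name}-{arch}"
--
--     binary_asset_names = [base_name]
--     if platform_name == "windows":
--         binary_asset_names = [f"{base_name}.exe", f"{base_name}-{DFIXXER_RELEASE_TAG}.exe"]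
--     else:
--         binary_asset_names = [base_name, f"{base_name}-{DFIXXER_RELEASE_TAG}"]
--
--     zip_asset_names = [f"{base_name}-{DFIXXER_RELEASE_TAG}.zip", f"{base_name}.zip"]
--
--     preferred_names = binary_asset_names + zip_asset_names
--     for expected_name in preferred_names:
--         for asset in assets:
--             if asset.get("name") == expected_name:
--                 return asset.get("browser_download_url"), expected_name, expected_name.endswith(".zip")
--
--     for asset in assets:
--         asset_name = asset.get("name", "")
--         if asset_name.startswith(base_name) and asset_name.endswith(".zip"):
--             return asset.get("browser_download_url"), asset_name, True
--
--     return None, None, False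
-- ===== SOURCE B (Python) =====
-- DFIXXER_RELEASE_TAG = "v0.9.2"
--
--
-- def find_download_asset(release_data: dict, platform_name: str, arch: str):
--     """Single-pass variant: rank the preferred names once, then scan the assets
--     once, keeping the exact match of smallest rank and the first zip fallback."""
--     assets = release_data.get("assets", [])
--     base_name = f"dfixxer-{platform_name}-{arch}"
--
--     if platform_name == "windows":
--         preferred = [f"{base_name}.exe", f"{base_name}-{DFIXXER_RELEASE_TAG}.exe"]
--     else:
--         preferred = [base_name, f"{base_name}-{DFIXXER_RELEASE_TAG}"]
--     preferred += [f"{base_name}-{DFIXXER_RELEASE_TAG}.zip", f"{base_name}.zip"]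
--
--     rank = {}
--     for i, name in enumerate(preferred):
--         if name not in rank:
--             rank[name] = i
--
--     best = None       # (rank, url, name) with the smallest rank; first asset wins ties
--     fallback = None   # first asset whose name starts with base_name and ends with '.zip'
--     for asset in assets:
--         name = asset.get("name", "")
--         r = rank.get(name)
--         if r is not None and (best is None or r < best[0]):
--             best = (r, asset.get("browser_download_url"), name)
--         if fallback is None and name.startswith(base_name) and name.endswith(".zip"):
--             fallback = (asset.get("browser_download_url"), name)
--
--     if best is not None:
--         return best[1], best[2], best[2].endswith(".zip")
--     if fallback is not None:
--         return fallback[0], fallback[1], True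
--     return None, None, False
-- ===== Notes on version B (the rewrite author's own statement) =====
-- stated objective: alternative
-- what changed: A scans the asset list once per preferred name (nested loops with early return) plus a separate fallback pass; B builds a rank dictionary over the preferred names once and makes a single pass over the assets, keeping the exact match of minimal rank (first asset wins ties) and the first zip fallback.
import Mathlib
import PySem

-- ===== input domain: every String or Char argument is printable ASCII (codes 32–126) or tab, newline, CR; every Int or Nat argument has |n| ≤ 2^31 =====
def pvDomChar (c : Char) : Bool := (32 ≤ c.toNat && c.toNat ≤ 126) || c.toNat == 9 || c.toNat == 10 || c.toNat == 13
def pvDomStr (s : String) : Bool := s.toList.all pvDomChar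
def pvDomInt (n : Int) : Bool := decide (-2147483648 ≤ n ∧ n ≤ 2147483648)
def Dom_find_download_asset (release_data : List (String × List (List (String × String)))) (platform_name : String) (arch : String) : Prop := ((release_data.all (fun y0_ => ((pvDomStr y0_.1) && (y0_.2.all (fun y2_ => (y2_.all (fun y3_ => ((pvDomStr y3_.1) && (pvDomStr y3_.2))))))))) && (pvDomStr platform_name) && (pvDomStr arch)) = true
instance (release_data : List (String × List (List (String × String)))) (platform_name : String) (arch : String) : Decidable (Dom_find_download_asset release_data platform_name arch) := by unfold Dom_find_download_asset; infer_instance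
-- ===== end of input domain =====

-- B replaces A's four passes over the assets (one per preferred name, plus a fallback pass)
-- by a rank dictionary over the preferred names and a single scan of the assets keeping the
-- minimal-rank exact match and the first zip fallback (objective: alternative decomposition).

-- ===== PORT A =====
-- dict.get k (first match in the association list, per the type convention)
def fdaLookup {ν : Type} (d : List (String × ν)) (k : String) : Option ν :=
  (d.find? (fun p => p.1 == k)).map (·.2)

-- asset.get("name", "")
def fdaNm (a : List (String × String)) : String := (fdaLookup a "name").getD ""

-- asset.get("browser_download_url")
def fdaUrl (a : List (String × String)) : Option String := fdaLookup a "browser_download_url"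

def fdaTag : String := "v0.9.2"

-- inner 'for asset in assets' of A's first (exact-name) loop
def fdaInner (n : String) (assets : List (List (String × String))) :
    Option (Option String × Option String × Bool) :=
  match assets with
  | [] => none
  | a :: rest =>
    if fdaLookup a "name" == some n then some (fdaUrl a, some n, PySem.Str.endswith n ".zip")
    else fdaInner n rest

-- outer 'for expected_name in preferred_names' loop of A
def fdaLoopA (names : List String) (assets : List (List (String × String))) :
    Option (Option String × Option String × Bool) :=
  match names with
  | [] => none
  | n :: rest =>
    match fdaInner n assets with
    | some r => some r
    | none => fdaLoopA rest assets

-- A's second (fallback zip) loop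
def fdaLoopB (base : String) (assets : List (List (String × String))) :
    Option (Option String × Option String × Bool) :=
  match assets with
  | [] => none
  | a :: rest =>
    if PySem.Str.startswith (fdaNm a) base && PySem.Str.endswith (fdaNm a) ".zip" then
      some (fdaUrl a, some (fdaNm a), true)
    else fdaLoopB base rest

def find_download_asset (release_data : List (String × List (List (String × String)))) (platform_name : String) (arch : String) : Option String × Option String × Bool :=
  let assets := (fdaLookup release_data "assets").getD []
  let base_name := "dfixxer-" ++ platform_name ++ "-" ++ arch
  let binary_asset_names :=
    if platform_name == "windows" then [base_name ++ ".exe", base_name ++ "-" ++ fdaTag ++ ".exe"]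
    else [base_name, base_name ++ "-" ++ fdaTag]
  let zip_asset_names := [base_name ++ "-" ++ fdaTag ++ ".zip", base_name ++ ".zip"]
  match fdaLoopA (binary_asset_names ++ zip_asset_names) assets with
  | some r => r
  | none =>
    match fdaLoopB base_name assets with
    | some r => r
    | none => (none, none, false)

-- ===== PORT B =====
-- the best-candidate update of B's single scan ('if r is not None and (best is None or r < best[0])')
def fdaStep (rk : List (String × String) → Option Int)
    (b : Option (Int × Option String × String)) (a : List (String × String)) :
    Option (Int × Option String × String) :=
  match rk a with
  | none => b
  | some r =>
    match b with
    | none => some (r, fdaUrl a, fdaNm a)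
    | some p => if r < p.1 then some (r, fdaUrl a, fdaNm a) else b

-- the fallback update of B's single scan ('if fallback is None and …')
def fdaFbStep (base : String) (fb : Option (Option String × String)) (a : List (String × String)) :
    Option (Option String × String) :=
  match fb with
  | some _ => fb
  | none =>
    if PySem.Str.startswith (fdaNm a) base && PySem.Str.endswith (fdaNm a) ".zip" then
      some (fdaUrl a, fdaNm a)
    else none

-- 'for i, name in enumerate(preferred): if name not in rank: rank[name] = i'
def fdaRank (names : List String) : PySem.Dict String Int :=
  (PySem.List.enumerate names 0).foldl
    (fun d p => if d.contains p.2 then d else d.insert p.2 p.1) PySem.Dict.empty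

def find_download_asset_alt (release_data : List (String × List (List (String × String)))) (platform_name : String) (arch : String) : Option String × Option String × Bool :=
  let assets := (fdaLookup release_data "assets").getD []
  let base_name := "dfixxer-" ++ platform_name ++ "-" ++ arch
  let preferred :=
    (if platform_name == "windows" then [base_name ++ ".exe", base_name ++ "-" ++ fdaTag ++ ".exe"]
     else [base_name, base_name ++ "-" ++ fdaTag]) ++
    [base_name ++ "-" ++ fdaTag ++ ".zip", base_name ++ ".zip"]
  let rank := fdaRank preferred
  let st := assets.foldl
    (fun st a => (fdaStep (fun a => PySem.Dict.get? rank (fdaNm a)) st.1 a, fdaFbStep base_name st.2 a))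
    (none, none)
  match st with
  | (some b, _) => (b.2.1, some b.2.2, PySem.Str.endswith b.2.2 ".zip")
  | (none, some f) => (f.1, some f.2, true)
  | (none, none) => (none, none, false)

-- ===== PRECONDITION & SPEC =====
def Spec_find_download_asset (release_data : List (String × List (List (String × String)))) (platform_name : String) (arch : String) (out : Option String × Option String × Bool) : Prop := out = find_download_asset_alt release_data platform_name arch
instance (release_data : List (String × List (List (String × String)))) (platform_name : String) (arch : String) (out : Option String × Option String × Bool) : Decidable (Spec_find_download_asset release_data platform_name arch out) := by unfold Spec_find_download_asset; infer_instance

-- ===== CLAIM (what is proved, stated in full; the proofs are below) =====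
def Claim_equal_find_download_asset : Prop := ∀ (release_data : List (String × List (List (String × String)))) (platform_name : String) (arch : String), Dom_find_download_asset release_data platform_name arch → Spec_find_download_asset release_data platform_name arch (find_download_asset release_data platform_name arch)

-- ===== LEMMAS AND PROOFS =====

-- the first-occurrence rank of a name in the preferred list, as an Int
def rkIdx (names : List String) (s : String) : Option Int :=
  (PySem.List.index? names s).map (fun k : Nat => (k : Int))

lemma rkIdx_nonneg (names : List String) (s : String) (r : Int) (h : rkIdx names s = some r) :
    0 ≤ r := by
  unfold rkIdx at h
  cases hk : PySem.List.index? names s with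
  | none => rw [hk] at h; simp at h
  | some k => rw [hk] at h; simp at h; omega

lemma fdaRank_loop (names : List String) : ∀ (s0 : Int) (d : PySem.Dict String Int) (s : String),
    ((PySem.List.enumerate names s0).foldl
      (fun d p => if d.contains p.2 then d else d.insert p.2 p.1) d).get? s
    = if d.contains s then d.get? s
      else (PySem.List.index? names s).map (fun k : Nat => s0 + (k : Int)) := by
  induction names with
  | nil =>
    intro s0 d s
    rw [PySem.List.enumerate_nil]
    simp only [List.foldl_nil, PySem.List.index?_eq_idxOf?, List.idxOf?_nil, Option.map_none]
    split
    · rfl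
    · next hc => exact (PySem.Dict.get?_eq_none_iff_contains d s).2 (by simpa using hc)
  | cons n rest ih =>
    intro s0 d s
    rw [PySem.List.enumerate_cons, List.foldl_cons]
    by_cases hsn : s = n
    · subst hsn
      by_cases hc : d.contains s = true
      · rw [if_pos hc]
        rw [ih, if_pos hc, if_pos hc]
      · rw [if_neg hc, ih, if_pos (PySem.Dict.contains_insert_self d s s0),
          PySem.Dict.get?_insert_self, if_neg hc, PySem.List.index?_cons_self]
        simp
    · have hstep : (if d.contains n = true then d else d.insert n s0).get? s = d.get? s := by
        split
        · rfl
        · exact PySem.Dict.get?_insert_of_ne d s0 hsn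
      have hcont : (if d.contains n = true then d else d.insert n s0).contains s = d.contains s := by
        split
        · rfl
        · rw [PySem.Dict.contains_insert]
          simp [hsn]
      rw [ih, hstep, hcont, PySem.List.index?_cons_of_ne rest (Ne.symm hsn)]
      split
      · rfl
      · cases PySem.List.index? rest s with
        | none => simp
        | some k => simp; ring

lemma fdaRank_get (names : List String) (s : String) :
    (fdaRank names).get? s = rkIdx names s := by
  unfold fdaRank rkIdx
  rw [fdaRank_loop names 0 PySem.Dict.empty s]
  rw [if_neg (by simp [PySem.Dict.contains_empty])]
  simp

-- the predicate of A's exact loop, read through asset.get("name", "")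
lemma fda_pred_true {a : List (String × String)} {n : String}
    (h : (fdaLookup a "name" == some n) = true) : fdaNm a = n := by
  unfold fdaNm
  cases hl : fdaLookup a "name" with
  | none => rw [hl] at h; simp at h
  | some s => rw [hl] at h; simp at h ⊢; exact h

lemma fda_pred_false {a : List (String × String)} {n : String} (hn : n ≠ "")
    (h : (fdaLookup a "name" == some n) = false) : fdaNm a ≠ n := by
  unfold fdaNm
  cases hl : fdaLookup a "name" with
  | none => simp only [Option.getD_none]; exact fun h' => hn h'.symm
  | some s => rw [hl] at h; simp at h ⊢; exact h

lemma fda_keepzero (rk : List (String × String) → Option Int)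
    (hz : ∀ a r, rk a = some r → 0 ≤ r) :
    ∀ (l : List (List (String × String))) (u : Option String) (s : String),
      l.foldl (fdaStep rk) (some (0, u, s)) = some (0, u, s) := by
  intro l
  induction l with
  | nil => intro u s; rfl
  | cons a t ih =>
    intro u s
    rw [List.foldl_cons]
    have hst : fdaStep rk (some (0, u, s)) a = some (0, u, s) := by
      cases h : rk a with
      | none => simp [fdaStep, h]
      | some r =>
        have := hz a r h
        simp [fdaStep, h, show ¬ r < 0 from by omega]
    rw [hst, ih]

lemma fda_shift (rk : List (String × String) → Option Int) :
    ∀ (l : List (List (String × String))) (b0 : Option (Int × Option String × String)),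
      l.foldl (fdaStep (fun a => (rk a).map (· + 1))) (b0.map (fun p => (p.1 + 1, p.2)))
      = (l.foldl (fdaStep rk) b0).map (fun p => (p.1 + 1, p.2)) := by
  intro l
  induction l with
  | nil => intro b0; simp
  | cons a t ih =>
    intro b0
    rw [List.foldl_cons, List.foldl_cons, ← ih]
    congr 1
    unfold fdaStep
    cases h : rk a with
    | none => simp [h]
    | some r =>
      cases b0 with
      | none => simp [h]
      | some p =>
        simp only [h, Option.map_some]
        by_cases hlt : r < p.1
        · rw [if_pos hlt, if_pos (by omega)]
          rfl
        · rw [if_neg hlt, if_neg (by omega)]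
          rfl

lemma fda_inner_none {n : String} :
    ∀ {assets : List (List (String × String))}, fdaInner n assets = none →
      ∀ a ∈ assets, (fdaLookup a "name" == some n) = false := by
  intro assets
  induction assets with
  | nil => intro _ a ha; cases ha
  | cons a t ih =>
    intro h b hb
    unfold fdaInner at h
    by_cases hp : (fdaLookup a "name" == some n) = true
    · rw [if_pos hp] at h; cases h
    · rw [if_neg hp] at h
      rcases List.mem_cons.1 hb with hb | hb
      · subst hb; simpa using hp
      · exact ih h b hb

lemma fdaStep_inv (rk : List (String × String) → Option Int)
    (b0 : Option (Int × Option String × String)) (a : List (String × String))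
    (hz : ∀ r, rk a = some r → 0 < r)
    (hinv : b0 = none ∨ ∃ r u s, b0 = some (r, u, s) ∧ 0 < r) :
    fdaStep rk b0 a = none ∨ ∃ r u s, fdaStep rk b0 a = some (r, u, s) ∧ 0 < r := by
  simp only [fdaStep]
  cases h : rk a with
  | none => exact hinv
  | some r =>
    have hr := hz r h
    rcases hinv with hb | ⟨r', u, s, hb, hr'⟩
    · subst hb; exact Or.inr ⟨r, fdaUrl a, fdaNm a, by simp, hr⟩
    · subst hb
      by_cases hlt : r < r'
      · exact Or.inr ⟨r, fdaUrl a, fdaNm a, by simp [hlt], hr⟩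
      · exact Or.inr ⟨r', u, s, by simp [hlt], hr'⟩

lemma fda_zero {n : String} (rest : List String) (hn : n ≠ "") :
    ∀ (assets : List (List (String × String))) (b0 : Option (Int × Option String × String)),
      (b0 = none ∨ ∃ r u s, b0 = some (r, u, s) ∧ 0 < r) →
      ∀ out, fdaInner n assets = some out →
      ∃ u, assets.foldl (fdaStep (fun a => rkIdx (n :: rest) (fdaNm a))) b0 = some (0, u, n) ∧
        out = (u, some n, PySem.Str.endswith n ".zip") := by
  intro assets
  induction assets with
  | nil => intro b0 _ out h; cases h
  | cons a t ih =>
    intro b0 hinv out h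
    unfold fdaInner at h
    by_cases hp : (fdaLookup a "name" == some n) = true
    · rw [if_pos hp] at h
      have hnm : fdaNm a = n := fda_pred_true hp
      have hra : rkIdx (n :: rest) n = some 0 := by
        unfold rkIdx; rw [PySem.List.index?_cons_self]; simp
      have hst : fdaStep (fun a => rkIdx (n :: rest) (fdaNm a)) b0 a = some (0, fdaUrl a, n) := by
        rcases hinv with hb | ⟨r, u, s, hb, hr⟩
        · subst hb; simp [fdaStep, hnm, hra]
        · subst hb; simp [fdaStep, hnm, hra, hr]
      refine ⟨fdaUrl a, ?_, (Option.some.inj h).symm⟩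
      rw [List.foldl_cons, hst]
      exact fda_keepzero _ (fun a r h' => rkIdx_nonneg _ _ _ h') t _ _
    · rw [if_neg hp] at h
      have hnm : fdaNm a ≠ n := fda_pred_false hn (by simpa using hp)
      have hz : ∀ r, rkIdx (n :: rest) (fdaNm a) = some r → 0 < r := by
        intro r hrk
        unfold rkIdx at hrk
        rw [PySem.List.index?_cons_of_ne rest (Ne.symm hnm)] at hrk
        cases hk : PySem.List.index? rest (fdaNm a) with
        | none => rw [hk] at hrk; simp at hrk
        | some k => rw [hk] at hrk; simp at hrk; omega
      rw [List.foldl_cons]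
      exact ih _ (fdaStep_inv _ b0 a hz hinv) out h

lemma fda_core : ∀ (names : List String), (∀ n ∈ names, n ≠ "") →
    ∀ (assets : List (List (String × String))),
      fdaLoopA names assets =
        Option.map (fun b => (b.2.1, some b.2.2, PySem.Str.endswith b.2.2 ".zip"))
          (assets.foldl (fdaStep (fun a => rkIdx names (fdaNm a))) none) := by
  intro names
  induction names with
  | nil =>
    intro _ assets
    have : assets.foldl (fdaStep (fun a => rkIdx [] (fdaNm a))) none = none := by
      rw [PySem.List.foldl_congr_mem assets _ (fun b _ => b) none
        (by intro acc x _; unfold fdaStep rkIdx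
            simp [PySem.List.index?_eq_idxOf?])]
      exact PySem.List.foldl_ignore assets none
    rw [this]
    rfl
  | cons n rest ih =>
    intro hne assets
    have hn : n ≠ "" := hne n (by simp)
    unfold fdaLoopA
    cases hin : fdaInner n assets with
    | some out =>
      obtain ⟨u, hf, hout⟩ := fda_zero rest hn assets none (Or.inl rfl) out hin
      rw [hf, hout]
      rfl
    | none =>
      have hall := fda_inner_none hin
      have hcg : assets.foldl (fdaStep (fun a => rkIdx (n :: rest) (fdaNm a))) none
          = assets.foldl (fdaStep (fun a => (rkIdx rest (fdaNm a)).map (· + 1))) none := by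
        apply PySem.List.foldl_congr_mem
        intro acc x hx
        have hnm : fdaNm x ≠ n := fda_pred_false hn (hall x hx)
        have : rkIdx (n :: rest) (fdaNm x) = (rkIdx rest (fdaNm x)).map (· + 1) := by
          unfold rkIdx
          rw [PySem.List.index?_cons_of_ne rest (Ne.symm hnm)]
          cases PySem.List.index? rest (fdaNm x) with
          | none => simp
          | some k => simp
        simp only [fdaStep, this]
      rw [hcg]
      have hshift := fda_shift (fun a => rkIdx rest (fdaNm a)) assets none
      simp only [Option.map_none] at hshift
      rw [hshift, ih (fun m hm => hne m (by simp [hm])) assets]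
      cases assets.foldl (fdaStep (fun a => rkIdx rest (fdaNm a))) none with
      | none => rfl
      | some p => rfl

lemma fda_fb_keep (base : String) :
    ∀ (l : List (List (String × String))) (x : Option String × String),
      l.foldl (fdaFbStep base) (some x) = some x := by
  intro l
  induction l with
  | nil => intro x; rfl
  | cons a t ih => intro x; rw [List.foldl_cons]; exact ih x

lemma fda_fb (base : String) : ∀ (assets : List (List (String × String))),
    fdaLoopB base assets =
      Option.map (fun f => (f.1, some f.2, true)) (assets.foldl (fdaFbStep base) none) := by
  intro assets
  induction assets with
  | nil => rfl
  | cons a t ih =>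
    rw [List.foldl_cons]
    have hst : fdaFbStep base none a =
        if (PySem.Str.startswith (fdaNm a) base && PySem.Str.endswith (fdaNm a) ".zip") = true
        then some (fdaUrl a, fdaNm a) else none := rfl
    by_cases hc : (PySem.Str.startswith (fdaNm a) base && PySem.Str.endswith (fdaNm a) ".zip") = true
    · rw [hst, if_pos hc, fda_fb_keep]
      unfold fdaLoopB
      rw [if_pos hc]
      rfl
    · rw [hst, if_neg hc]
      unfold fdaLoopB
      rw [if_neg hc]
      exact ih

lemma fda_ne_empty_append (x t : String) (hx : x ≠ "") : x ++ t ≠ "" := by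
  intro h
  apply hx
  have := congrArg String.toList h
  simp at this
  rcases this with ⟨h1, _⟩
  cases x
  simp_all

lemma fda_base_ne (p a : String) : "dfixxer-" ++ p ++ "-" ++ a ≠ "" := by
  apply fda_ne_empty_append
  apply fda_ne_empty_append
  intro h
  have := congrArg String.toList h
  simp at this

lemma fda_assemble (assets : List (List (String × String))) (base : String)
    (names : List String) (hne : ∀ n ∈ names, n ≠ "") :
    (match fdaLoopA names assets with
     | some r => r
     | none =>
       match fdaLoopB base assets with
       | some r => r
       | none => (none, none, false)) =
    (match assets.foldl
        (fun st a => (fdaStep (fun a => PySem.Dict.get? (fdaRank names) (fdaNm a)) st.1 a,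
                      fdaFbStep base st.2 a)) (none, none) with
     | (some b, _) => (b.2.1, some b.2.2, PySem.Str.endswith b.2.2 ".zip")
     | (none, some f) => (f.1, some f.2, true)
     | (none, none) => ((none : Option String), (none : Option String), false)) := by
  rw [PySem.List.foldl_prod_mk
    (f := fun b a => fdaStep (fun a => PySem.Dict.get? (fdaRank names) (fdaNm a)) b a)
    (g := fun fb a => fdaFbStep base fb a)]
  have hrk : (fun a => PySem.Dict.get? (fdaRank names) (fdaNm a))
      = (fun a => rkIdx names (fdaNm a)) := funext fun a => fdaRank_get names (fdaNm a)
  rw [hrk]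
  rw [fda_core names hne assets, fda_fb base assets]
  cases hB : assets.foldl (fdaStep (fun a => rkIdx names (fdaNm a))) none with
  | some b => rfl
  | none =>
    cases hF : assets.foldl (fdaFbStep base) none with
    | some f => rfl
    | none => rfl

-- ===== VERDICT (by name: the statement is the Claim_ definition above) =====
theorem find_download_asset_spec : Claim_equal_find_download_asset := by
  intro release_data platform_name arch _
  unfold Spec_find_download_asset find_download_asset find_download_asset_alt
  apply fda_assemble
  intro n hn
  rcases List.mem_append.1 hn with h | h
  · split at h <;> simp at h <;> rcases h with h | h <;> subst h
    · exact fda_ne_empty_append _ _ (fda_base_ne _ _)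
    · exact fda_ne_empty_append _ _ (fda_ne_empty_append _ _ (fda_ne_empty_append _ _ (fda_base_ne _ _)))
    · exact fda_base_ne _ _
    · exact fda_ne_empty_append _ _ (fda_ne_empty_append _ _ (fda_base_ne _ _))
  · simp at h
    rcases h with h | h <;> subst h
    · exact fda_ne_empty_append _ _ (fda_ne_empty_append _ _ (fda_ne_empty_append _ _ (fda_base_ne _ _)))
    · exact fda_ne_empty_append _ _ (fda_base_ne _ _)
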